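-- pv_equiv track=rewrite | github.com/miliar/Code_Jam_Webscraper | solutions_python/Problem_190/94.py | calc
-- ===== SOURCE A (Python) =====
-- def calc(win, n):
--     if n == 0:
--         return win
--     p = calc(win, n-1)
--     if win == 'P':
--         p2 = calc('R', n-1)
--     elif win == 'R':
--         p2 = calc('S', n-1)
--     else:
--         p2 = calc('P', n-1)
--     if p < p2:
--         return p + p2
--     return p2 + p
-- ===== SOURCE B (Python) =====
-- def _merge(a, b):
--     return a + b if a < b else b + a
--
-- def calc(win, n):
--     w, p, r, s = win, "P", "R", "S"
--     for _ in range(n):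
--         pw = r if win == "P" else (s if win == "R" else p)
--         w, p, r, s = _merge(w, pw), _merge(p, r), _merge(r, s), _merge(s, p)
--     return w
-- ===== Notes on version B (the rewrite author's own statement) =====
-- stated objective: alternative
-- what changed: Replaced A's top-down double recursion (a call tree with 2^n nodes) by a single bottom-up loop of n iterations that keeps the four possible subproblem values (win,'P','R','S') in four registers; total cost is still dominated by the 2^n-sized output string.
-- crash fix: For n < 0 A raises RecursionError (it recurses on n-1 past 0) while B's empty range loop returns win unchanged. — e.g. on calc("P", -1): A raises RecursionError, B returns "P"
import Mathlib
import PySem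

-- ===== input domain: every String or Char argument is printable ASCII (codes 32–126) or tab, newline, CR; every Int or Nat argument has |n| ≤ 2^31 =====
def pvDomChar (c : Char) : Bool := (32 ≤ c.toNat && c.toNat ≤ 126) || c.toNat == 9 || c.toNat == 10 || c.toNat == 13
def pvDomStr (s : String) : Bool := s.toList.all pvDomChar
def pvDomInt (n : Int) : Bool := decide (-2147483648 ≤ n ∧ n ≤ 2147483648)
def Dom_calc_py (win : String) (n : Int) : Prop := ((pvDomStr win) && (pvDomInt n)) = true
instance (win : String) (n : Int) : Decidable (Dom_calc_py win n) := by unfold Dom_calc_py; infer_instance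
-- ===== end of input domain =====

-- B replaces A's top-down double recursion by one bottom-up
-- loop over n that keeps the four possible subproblem values in four registers.
-- A raises RecursionError for n < 0 (excluded by Pre_); B returns win there.

-- ===== PORT A =====
-- literal transliteration of A's recursion; Pre_ restricts to 0 ≤ n, where n.toNat = n
def calcA : String → Nat → String
  | win, 0 => win
  | win, Nat.succ m =>
    let p := calcA win m
    let p2 := if win = "P" then calcA "R" m
              else if win = "R" then calcA "S" m
              else calcA "P" m
    if p < p2 then p ++ p2 else p2 ++ p

def calc_py (win : String) (n : Int) : String := calcA win n.toNat

-- ===== PORT B =====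
def mergeB (a b : String) : String := if a < b then a ++ b else b ++ a

def calc_py_alt (win : String) (n : Int) : String :=
  ((PySem.List.pyRange 0 n 1).foldl
    (fun (st : String × String × String × String) _ =>
      let (w, p, r, s) := st
      let pw := if win = "P" then r else if win = "R" then s else p
      (mergeB w pw, mergeB p r, mergeB r s, mergeB s p))
    (win, "P", "R", "S")).1

-- ===== PRECONDITION & SPEC =====
-- A recurses on n-1 without a floor: for n < 0 it raises RecursionError, so Pre_ requires 0 ≤ n.
def Pre_calc_py (win : String) (n : Int) : Prop := 0 ≤ n
instance (win : String) (n : Int) : Decidable (Pre_calc_py win n) := by unfold Pre_calc_py; infer_instance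
def pvWitness_calc_py : String × Int := ("P", 3)

-- On n < 0 A raises RecursionError while B's empty loop returns win unchanged.
def Raises_calc_py (win : String) (n : Int) : Prop := n < 0
instance (win : String) (n : Int) : Decidable (Raises_calc_py win n) := by unfold Raises_calc_py; infer_instance
def pvRaiseWitness_calc_py : String × Int := ("P", -1)
def pvRaiseWitnessOut_calc_py : String := "P"

def Spec_calc_py (win : String) (n : Int) (out : String) : Prop := out = calc_py_alt win n
instance (win : String) (n : Int) (out : String) : Decidable (Spec_calc_py win n out) := by unfold Spec_calc_py; infer_instance

-- ===== CLAIM (what is proved, stated in full; the proofs are below) =====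
def Claim_equal_calc_py : Prop := ∀ (win : String) (n : Int), Dom_calc_py win n → Pre_calc_py win n → Spec_calc_py win n (calc_py win n)
def Claim_raises_calc_py : Prop := (∀ (win : String) (n : Int), Dom_calc_py win n → Raises_calc_py win n → ¬ Pre_calc_py win n) ∧ (Dom_calc_py (pvRaiseWitness_calc_py.1) (pvRaiseWitness_calc_py.2) ∧ Raises_calc_py (pvRaiseWitness_calc_py.1) (pvRaiseWitness_calc_py.2) ∧ calc_py_alt (pvRaiseWitness_calc_py.1) (pvRaiseWitness_calc_py.2) = pvRaiseWitnessOut_calc_py)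

-- ===== LEMMAS AND PROOFS =====

-- one loop step advances all four registers from level k to level k+1
lemma stepB (win : String) (k : Nat) (x : Int) :
    (fun (st : String × String × String × String) (_ : Int) =>
      let (w, p, r, s) := st
      let pw := if win = "P" then r else if win = "R" then s else p
      (mergeB w pw, mergeB p r, mergeB r s, mergeB s p))
      (calcA win k, calcA "P" k, calcA "R" k, calcA "S" k) x
    = (calcA win (k+1), calcA "P" (k+1), calcA "R" (k+1), calcA "S" (k+1)) := by
  by_cases h1 : win = "P" <;> by_cases h2 : win = "R" <;>
    simp [h1, h2, calcA, mergeB]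

lemma foldB_inv (win : String) (l : List Int) (k : Nat) :
    l.foldl
      (fun (st : String × String × String × String) (_ : Int) =>
        let (w, p, r, s) := st
        let pw := if win = "P" then r else if win = "R" then s else p
        (mergeB w pw, mergeB p r, mergeB r s, mergeB s p))
      (calcA win k, calcA "P" k, calcA "R" k, calcA "S" k)
    = (calcA win (k + l.length), calcA "P" (k + l.length),
       calcA "R" (k + l.length), calcA "S" (k + l.length)) := by
  induction l generalizing k with
  | nil => simp
  | cons x xs ih =>
      simp only [List.foldl_cons, List.length_cons]
      rw [show k + (xs.length + 1) = (k+1) + xs.length by omega]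
      have h := (stepB win k x) ▸ ih (k+1)
      exact h

-- ===== VERDICT (by name: the statement is the Claim_ definition above) =====
theorem calc_py_spec : Claim_equal_calc_py := by
  intro win n _ hpre
  unfold Spec_calc_py calc_py calc_py_alt
  have h0 : ((win, "P", "R", "S") : String × String × String × String)
      = (calcA win 0, calcA "P" 0, calcA "R" 0, calcA "S" 0) := by simp [calcA]
  rw [h0, foldB_inv]
  simp [PySem.List.length_pyRange_one]

theorem calc_py_raises_witness : Dom_calc_py (pvRaiseWitness_calc_py.1) (pvRaiseWitness_calc_py.2) ∧ Raises_calc_py (pvRaiseWitness_calc_py.1) (pvRaiseWitness_calc_py.2) ∧ calc_py_alt (pvRaiseWitness_calc_py.1) (pvRaiseWitness_calc_py.2) = pvRaiseWitnessOut_calc_py := by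
  decide

def calc_py_raises : Claim_raises_calc_py := by
  unfold Claim_raises_calc_py
  exact ⟨fun win n _ hr hp => absurd hp (by unfold Pre_calc_py Raises_calc_py at *; omega),
         calc_py_raises_witness⟩
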